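-- pv_equiv track=rewrite | github.com/xdotli/SWE-smith | collect_directus_prs.py | is_good_pr
-- ===== SOURCE A (Python) =====
-- def is_good_pr(pr_data, files):
--     """Filter for PRs with test file changes and reasonable size."""
--     # Must have test files (not just snapshots)
--     test_files = [
--         f for f in files
--         if (f["filename"].endswith((".test.ts", ".test.tsx", ".spec.ts", ".spec.tsx"))
--             and ".snap" not in f["filename"])
--     ]
--
--     # Must have code file changes
--     code_files = [
--         f for f in files
--         if f["filename"].endswith((".ts", ".tsx", ".js", ".jsx"))
--         and not f["filename"].endswith((".test.ts", ".test.tsx", ".spec.ts", ".spec.tsx"))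
--         and ".snap" not in f["filename"]
--     ]
--
--     # Filter criteria
--     has_test_changes = len(test_files) > 0
--     has_code_changes = len(code_files) > 0
--     is_focused = len(files) <= 10  # Not too many files
--     reasonable_size = pr_data.get("additions", 0) + pr_data.get("deletions", 0) < 5000
--
--     return has_test_changes and has_code_changes and is_focused and reasonable_size
-- ===== SOURCE B (Python) =====
-- def is_good_pr(pr_data, files):
--     """Filter for PRs with test file changes and reasonable size."""
--     has_test_changes = False
--     has_code_changes = False
--     for f in files:
--         name = f["filename"]
--         if ".snap" in name:
--             continue
--         if name.endswith((".test.ts", ".test.tsx", ".spec.ts", ".spec.tsx")):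
--             has_test_changes = True
--         elif name.endswith((".ts", ".tsx", ".js", ".jsx")):
--             has_code_changes = True
--         if has_test_changes and has_code_changes:
--             break
--     return (has_test_changes and has_code_changes and len(files) <= 10
--             and pr_data.get("additions", 0) + pr_data.get("deletions", 0) < 5000)
-- ===== Notes on version B (the rewrite author's own statement) =====
-- stated objective: simpler
-- what changed: Replaces A's two list-building comprehensions (materialising test_files and code_files only to test emptiness) with a single pass over files that maintains two existence flags and breaks as soon as both are set.
import Mathlib
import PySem

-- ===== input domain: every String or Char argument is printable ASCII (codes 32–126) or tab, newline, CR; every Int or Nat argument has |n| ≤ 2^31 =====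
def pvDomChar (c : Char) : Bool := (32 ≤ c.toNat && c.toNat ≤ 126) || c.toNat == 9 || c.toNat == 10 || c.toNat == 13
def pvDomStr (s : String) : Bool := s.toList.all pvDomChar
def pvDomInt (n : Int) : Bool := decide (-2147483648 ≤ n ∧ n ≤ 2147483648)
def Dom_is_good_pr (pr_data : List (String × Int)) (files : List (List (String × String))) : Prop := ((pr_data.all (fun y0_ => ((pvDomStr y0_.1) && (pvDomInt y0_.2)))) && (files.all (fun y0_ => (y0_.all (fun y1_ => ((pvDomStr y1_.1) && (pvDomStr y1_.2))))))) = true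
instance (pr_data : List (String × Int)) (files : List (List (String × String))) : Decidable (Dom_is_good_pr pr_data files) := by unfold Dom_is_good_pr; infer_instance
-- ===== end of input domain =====

-- B replaces A's two list-building comprehensions by one early-exiting scan maintaining
-- two existence flags (objective: simpler/alternative; same return value).


-- ===== PORT A =====
-- f["filename"] : first-match lookup; Pre_ guarantees the key is present (else Python raises KeyError).
def pvFilename (f : List (String × String)) : String := (f.lookup "filename").getD ""

def pvEndsTest (name : String) : Bool :=
  PySem.Str.endswith name ".test.ts" || PySem.Str.endswith name ".test.tsx" ||
  PySem.Str.endswith name ".spec.ts" || PySem.Str.endswith name ".spec.tsx"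

def pvEndsCode (name : String) : Bool :=
  PySem.Str.endswith name ".ts" || PySem.Str.endswith name ".tsx" ||
  PySem.Str.endswith name ".js" || PySem.Str.endswith name ".jsx"

def is_good_pr (pr_data : List (String × Int)) (files : List (List (String × String))) : Bool :=
  let test_files := files.filter (fun f =>
    pvEndsTest (pvFilename f) && !(PySem.Str.isIn ".snap" (pvFilename f)))
  let code_files := files.filter (fun f =>
    pvEndsCode (pvFilename f) && !(pvEndsTest (pvFilename f)) &&
    !(PySem.Str.isIn ".snap" (pvFilename f)))
  let has_test_changes := decide (test_files.length > 0)
  let has_code_changes := decide (code_files.length > 0)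
  let is_focused := decide (files.length ≤ 10)
  let reasonable_size := decide ((pr_data.lookup "additions").getD 0 + (pr_data.lookup "deletions").getD 0 < 5000)
  has_test_changes && has_code_changes && is_focused && reasonable_size

-- ===== PORT B =====
-- one pass over files maintaining two flags, early exit once both are true (B's loop, literally)
def pvScanFlags : List (List (String × String)) → Bool → Bool → Bool × Bool
  | [], ht, hc => (ht, hc)
  | f :: rest, ht, hc =>
      let name := pvFilename f
      if PySem.Str.isIn ".snap" name then pvScanFlags rest ht hc   -- continue
      else
        let ht' := if pvEndsTest name then true else ht
        let hc' := if !(pvEndsTest name) && pvEndsCode name then true else hc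
        if ht' && hc' then (ht', hc')                              -- break
        else pvScanFlags rest ht' hc'

def is_good_pr_alt (pr_data : List (String × Int)) (files : List (List (String × String))) : Bool :=
  let flags := pvScanFlags files false false
  flags.1 && flags.2 && decide (files.length ≤ 10) &&
    decide ((pr_data.lookup "additions").getD 0 + (pr_data.lookup "deletions").getD 0 < 5000)

-- ===== PRECONDITION & SPEC =====
-- Pre_ excludes exactly the inputs where Python A raises KeyError: a file dict without "filename".
def Pre_is_good_pr (pr_data : List (String × Int)) (files : List (List (String × String))) : Prop :=
  (files.all (fun f => (f.lookup "filename").isSome)) = true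
instance (pr_data : List (String × Int)) (files : List (List (String × String))) : Decidable (Pre_is_good_pr pr_data files) := by unfold Pre_is_good_pr; infer_instance

def pvWitness_is_good_pr : (List (String × Int)) × (List (List (String × String))) :=
  ([("additions", 10), ("deletions", 2)],
   [[("filename", "a.test.ts")], [("filename", "a.ts")]])

def Spec_is_good_pr (pr_data : List (String × Int)) (files : List (List (String × String))) (out : Bool) : Prop := out = is_good_pr_alt pr_data files
instance (pr_data : List (String × Int)) (files : List (List (String × String))) (out : Bool) : Decidable (Spec_is_good_pr pr_data files out) := by unfold Spec_is_good_pr; infer_instance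

-- ===== CLAIM (what is proved, stated in full; the proofs are below) =====
def Claim_equal_is_good_pr : Prop := ∀ (pr_data : List (String × Int)) (files : List (List (String × String))), Dom_is_good_pr pr_data files → Pre_is_good_pr pr_data files → Spec_is_good_pr pr_data files (is_good_pr pr_data files)

-- ===== LEMMAS AND PROOFS =====

def pvTestP (f : List (String × String)) : Bool :=
  pvEndsTest (pvFilename f) && !(PySem.Str.isIn ".snap" (pvFilename f))
def pvCodeP (f : List (String × String)) : Bool :=
  pvEndsCode (pvFilename f) && !(pvEndsTest (pvFilename f)) && !(PySem.Str.isIn ".snap" (pvFilename f))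

-- the scan computes exactly "a test file exists / a code file exists"
theorem pvScanFlags_eq (l : List (List (String × String))) (ht hc : Bool) :
    pvScanFlags l ht hc = (ht || l.any pvTestP, hc || l.any pvCodeP) := by
  induction l generalizing ht hc with
  | nil => simp [pvScanFlags]
  | cons f rest ih =>
    cases hs : PySem.Chars.isIn ['.', 's', 'n', 'a', 'p'] (pvFilename f).toList <;>
    cases hT : pvEndsTest (pvFilename f) <;>
    cases hC : pvEndsCode (pvFilename f) <;>
    cases ht <;> cases hc <;>
      simp_all [pvScanFlags, pvTestP, pvCodeP]

theorem pvFilterPos (p : List (String × String) → Bool) (l : List (List (String × String))) :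
    decide (0 < (l.filter p).length) = l.any p := by
  rw [Bool.eq_iff_iff]
  simp [List.any_eq_true, List.length_pos_iff, List.filter_eq_nil_iff]

-- ===== VERDICT (by name: the statement is the Claim_ definition above) =====
theorem is_good_pr_spec : Claim_equal_is_good_pr := by
  intro pr_data files _ _
  unfold Spec_is_good_pr is_good_pr is_good_pr_alt
  rw [pvScanFlags_eq]
  simp only [Bool.false_or]
  rw [pvFilterPos, pvFilterPos]
  rfl
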